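-- pv_equiv track=rewrite | github.com/step-quiz/tutor-eq | app.py | _filter_superseded_errors
-- ===== SOURCE A (Python) =====
-- def _filter_superseded_errors(history: list) -> list:
--     """
--     Amaga els errors que han estat superats per un pas correcte posterior.
--     Estratègia: recorrem la història; quan trobem un pas correcte, eliminem
--     de la llista visible tots els errors immediatament anteriors fins al
--     darrer pas correcte (o l'enunciat). Els passos de tipus 'no_math'
--     (avisos d'ús inadequat) també queden amagats si han estat superats.
--
--     El JSON sencer es manté al rastre per al professorat.
--     """
--     visible = []
--     for h in history:
--         v = h["verdict"]
--         if v in ("correcte_progres", "correcte_estancat"):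
--             # Aquest pas correcte supera els errors previs encara visibles.
--             # Eliminem els errors fins al darrer pas correcte/inicial.
--             while visible and visible[-1]["verdict"] in ("error", "no_math"):
--                 visible.pop()
--             visible.append(h)
--         else:
--             visible.append(h)
--     return visible
-- ===== SOURCE B (Python) =====
-- def _filter_superseded_errors(history: list) -> list:
--     # Single backward pass with a "superseded" flag instead of stack pops.
--     out = []
--     superseded = False
--     for h in reversed(history):
--         v = h["verdict"]
--         if v in ("correcte_progres", "correcte_estancat"):
--             out.append(h)
--             superseded = True
--         elif v in ("error", "no_math"):
--             if not superseded:
--                 out.append(h)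
--         else:
--             out.append(h)
--             superseded = False
--     out.reverse()
--     return out
-- ===== Notes on version B (the rewrite author's own statement) =====
-- stated objective: alternative
-- what changed: Replaces the forward pass with a while-loop that pops trailing errors off the visible stack by a single backward pass that keeps a boolean 'superseded' flag and then reverses the buffer; Pre_ excludes only histories with an item lacking a 'verdict' key, on which both programs raise KeyError.
import Mathlib
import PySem

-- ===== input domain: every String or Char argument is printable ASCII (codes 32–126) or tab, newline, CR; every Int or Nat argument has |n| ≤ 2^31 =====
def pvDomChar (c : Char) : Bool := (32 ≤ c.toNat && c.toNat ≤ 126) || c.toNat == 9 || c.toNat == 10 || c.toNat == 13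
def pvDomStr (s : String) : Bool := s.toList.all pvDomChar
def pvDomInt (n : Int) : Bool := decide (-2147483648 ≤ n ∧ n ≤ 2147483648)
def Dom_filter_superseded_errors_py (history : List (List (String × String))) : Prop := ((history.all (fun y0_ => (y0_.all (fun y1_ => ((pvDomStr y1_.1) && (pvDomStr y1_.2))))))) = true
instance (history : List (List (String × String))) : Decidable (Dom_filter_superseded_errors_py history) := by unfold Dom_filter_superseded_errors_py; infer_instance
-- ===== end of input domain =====

-- B replaces A's forward pass with stack pops by a backward marking pass with a flag; same cost, different structure.

-- h["verdict"]: first-match association-list lookup; "" only outside Pre_ (where Python raises KeyError)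
def pvVerdict (h : List (String × String)) : String :=
  ((h.find? (fun p => p.1 == "verdict")).map Prod.snd).getD ""

def pvIsCorrect (v : String) : Bool := v == "correcte_progres" || v == "correcte_estancat"

def pvIsErr (v : String) : Bool := v == "error" || v == "no_math"

-- ===== PORT A =====
-- the 'while visible and visible[-1]["verdict"] in ("error","no_math"): visible.pop()' loop
def pvPopErrs (visible : List (List (String × String))) : List (List (String × String)) :=
  match _hlast : visible.getLast? with
  | some x => if pvIsErr (pvVerdict x) then pvPopErrs visible.dropLast else visible
  | none => visible
termination_by visible.length
decreasing_by
  have hne : visible ≠ [] := by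
    intro h; subst h; simp at _hlast
  have := List.length_pos_of_ne_nil hne
  simp [List.length_dropLast]; omega

def filter_superseded_errors_py (history : List (List (String × String))) : List (List (String × String)) :=
  history.foldl (fun visible h =>
    let v := pvVerdict h
    if pvIsCorrect v then pvPopErrs visible ++ [h]
    else visible ++ [h]) []

-- ===== PORT B =====
-- one step of B's backward loop, on state (out, superseded)
def pvBStep (st : List (List (String × String)) × Bool) (h : List (String × String)) :
    List (List (String × String)) × Bool :=
  let v := pvVerdict h
  if pvIsCorrect v then (st.1 ++ [h], true)
  else if pvIsErr v then (if st.2 then st else (st.1 ++ [h], st.2))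
  else (st.1 ++ [h], false)

def filter_superseded_errors_py_alt (history : List (List (String × String))) : List (List (String × String)) :=
  (history.reverse.foldl pvBStep ([], false)).1.reverse

-- ===== PRECONDITION & SPEC =====
-- Pre_ excludes exactly the histories with an item lacking a "verdict" key, on which Python A raises KeyError.
def Pre_filter_superseded_errors_py (history : List (List (String × String))) : Prop :=
  ∀ h ∈ history, (h.find? (fun p => p.1 == "verdict")).isSome = true
instance (history : List (List (String × String))) : Decidable (Pre_filter_superseded_errors_py history) := by unfold Pre_filter_superseded_errors_py; infer_instance

def pvWitness_filter_superseded_errors_py : (List (List (String × String))) :=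
  [[("verdict", "error")], [("verdict", "correcte_progres")], [("verdict", "enunciat")]]

def Spec_filter_superseded_errors_py (history : List (List (String × String))) (out : List (List (String × String))) : Prop := out = filter_superseded_errors_py_alt history
instance (history : List (List (String × String))) (out : List (List (String × String))) : Decidable (Spec_filter_superseded_errors_py history out) := by unfold Spec_filter_superseded_errors_py; infer_instance

-- ===== CLAIM (what is proved, stated in full; the proofs are below) =====
def Claim_equal_filter_superseded_errors_py : Prop := ∀ (history : List (List (String × String))), Dom_filter_superseded_errors_py history → Pre_filter_superseded_errors_py history → Spec_filter_superseded_errors_py history (filter_superseded_errors_py history)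

-- ===== LEMMAS AND PROOFS =====

-- B's fold from an arbitrary state only appends to the accumulator
def pvF (l : List (List (String × String))) (s : Bool) : List (List (String × String)) × Bool :=
  l.foldl pvBStep ([], s)

theorem pvF_shift (l : List (List (String × String))) (acc : List (List (String × String))) (s : Bool) :
    l.foldl pvBStep (acc, s) = (acc ++ (pvF l s).1, (pvF l s).2) := by
  induction l generalizing acc s with
  | nil => simp [pvF]
  | cons h t ih =>
    simp only [pvF, List.foldl_cons]
    by_cases hc : pvIsCorrect (pvVerdict h)
    · simp only [pvBStep, hc, if_pos]
      rw [ih, ih]; simp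
    · by_cases he : pvIsErr (pvVerdict h)
      · simp only [pvBStep, hc, he, if_neg, if_pos, Bool.false_eq_true, not_false_iff]
        cases s with
        | true => simp only [if_pos]; rw [ih, ih]; simp
        | false => simp only [Bool.false_eq_true, if_neg, not_false_iff]; rw [ih, ih]; simp
      · simp only [pvBStep, hc, he, if_neg, Bool.false_eq_true, not_false_iff]
        rw [ih, ih]; simp

theorem pvPopErrs_nil : pvPopErrs [] = [] := by
  unfold pvPopErrs; rfl

theorem pvPopErrs_concat (ys : List (List (String × String))) (x : List (String × String)) :
    pvPopErrs (ys ++ [x]) = if pvIsErr (pvVerdict x) then pvPopErrs ys else ys ++ [x] := by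
  rw [pvPopErrs]
  split
  · rename_i x1 hl
    rw [List.getLast?_concat] at hl
    cases hl
    rw [List.dropLast_concat]
  · rename_i hl
    rw [List.getLast?_concat] at hl
    exact absurd hl (by simp)

-- key invariant: running B's loop with the flag set equals popping trailing errors of the flag-clear run
theorem pvF_true_popErrs (l : List (List (String × String))) :
    (pvF l true).1.reverse = pvPopErrs ((pvF l false).1.reverse) := by
  induction l with
  | nil => simp [pvF, pvPopErrs_nil]
  | cons h t ih =>
    by_cases hc : pvIsCorrect (pvVerdict h)
    · have step : ∀ s, pvF (h :: t) s = ([h] ++ (pvF t true).1, (pvF t true).2) := by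
        intro s
        simp only [pvF, List.foldl_cons, pvBStep, hc, if_pos]
        exact pvF_shift t [h] true
      rw [step true, step false]
      simp only [List.reverse_append, List.reverse_cons, List.reverse_nil, List.nil_append]
      rw [pvPopErrs_concat]
      have hne : pvIsErr (pvVerdict h) = false := by
        revert hc; unfold pvIsCorrect pvIsErr
        cases hv : pvVerdict h == "correcte_progres" <;>
          cases hv2 : pvVerdict h == "correcte_estancat" <;> simp_all
      simp [hne]
    · by_cases he : pvIsErr (pvVerdict h)
      · have stepT : pvF (h :: t) true = pvF t true := by
          simp only [pvF, List.foldl_cons, pvBStep, hc, he, Bool.false_eq_true, if_neg,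
            not_false_iff, if_pos]
        have stepF : pvF (h :: t) false = ([h] ++ (pvF t false).1, (pvF t false).2) := by
          simp only [pvF, List.foldl_cons, pvBStep, hc, he, Bool.false_eq_true, if_neg,
            not_false_iff, if_pos]
          exact pvF_shift t [h] false
        rw [stepT, stepF]
        simp only [List.reverse_append, List.reverse_cons, List.reverse_nil, List.nil_append]
        rw [pvPopErrs_concat, if_pos he]
        exact ih
      · have step : ∀ s, pvF (h :: t) s = ([h] ++ (pvF t false).1, (pvF t false).2) := by
          intro s
          simp only [pvF, List.foldl_cons, pvBStep, hc, he, Bool.false_eq_true, if_neg,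
            not_false_iff]
          exact pvF_shift t [h] false
        rw [step true, step false]
        simp only [List.reverse_append, List.reverse_cons, List.reverse_nil, List.nil_append]
        rw [pvPopErrs_concat, if_neg (by simp [he])]

theorem pv_main (history : List (List (String × String))) :
    filter_superseded_errors_py history = filter_superseded_errors_py_alt history := by
  induction history using List.reverseRecOn with
  | nil => rfl
  | append_singleton hist h ih =>
    unfold filter_superseded_errors_py filter_superseded_errors_py_alt
    have hA : filter_superseded_errors_py hist = (pvF hist.reverse false).1.reverse := ih
    unfold filter_superseded_errors_py at hA
    rw [List.foldl_append, List.foldl_cons, List.foldl_nil]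
    have hrev : (hist ++ [h]).reverse = h :: hist.reverse := by
      rw [List.reverse_append]; rfl
    rw [hrev, List.foldl_cons]
    by_cases hc : pvIsCorrect (pvVerdict h)
    · rw [if_pos hc]
      have hb : pvBStep ([], false) h = ([h], true) := by
        simp [pvBStep, hc]
      rw [hb, pvF_shift hist.reverse [h] true]
      simp only [List.reverse_append, List.reverse_cons, List.reverse_nil, List.nil_append]
      rw [pvF_true_popErrs, hA]
    · rw [if_neg hc]
      by_cases he : pvIsErr (pvVerdict h)
      · have hb : pvBStep ([], false) h = ([h], false) := by
          simp [pvBStep, hc, he]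
        rw [hb, pvF_shift hist.reverse [h] false]
        simp only [List.reverse_append, List.reverse_cons, List.reverse_nil, List.nil_append]
        rw [hA]
      · have hb : pvBStep ([], false) h = ([h], false) := by
          simp [pvBStep, hc, he]
        rw [hb, pvF_shift hist.reverse [h] false]
        simp only [List.reverse_append, List.reverse_cons, List.reverse_nil, List.nil_append]
        rw [hA]

-- ===== VERDICT (by name: the statement is the Claim_ definition above) =====
theorem filter_superseded_errors_py_spec : Claim_equal_filter_superseded_errors_py := by
  intro history _ _
  exact pv_main history
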